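-- pv_equiv track=rewrite | github.com/sneeezed/blendsync | blendsync/operators.py | _color_for_branch
-- ===== SOURCE A (Python) =====
-- BRANCH_COLORS = [
--     'COLORSET_04_VEC',  # green  — main/master
--     'COLORSET_01_VEC',  # red
--     'COLORSET_06_VEC',  # blue
--     'COLORSET_03_VEC',  # yellow
--     'COLORSET_07_VEC',  # purple
--     'COLORSET_02_VEC',  # orange
--     'COLORSET_05_VEC',  # teal
--     'COLORSET_08_VEC',  # violet
--     'COLORSET_11_VEC',  # light green
--     'COLORSET_09_VEC',  # dark blue
-- ]
--
-- def _color_for_branch(name, all_names):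
--     if name in ('main', 'master'):
--         return BRANCH_COLORS[0]
--     others = sorted(n for n in all_names if n not in ('main', 'master'))
--     try:
--         idx = (others.index(name) + 1) % len(BRANCH_COLORS)
--     except ValueError:
--         idx = 1
--     return BRANCH_COLORS[idx]
-- ===== SOURCE B (Python) =====
-- _PALETTE = (
--     'COLORSET_04_VEC',  # green  — main/master
--     'COLORSET_01_VEC',  # red
--     'COLORSET_06_VEC',  # blue
--     'COLORSET_03_VEC',  # yellow
--     'COLORSET_07_VEC',  # purple
--     'COLORSET_02_VEC',  # orange
--     'COLORSET_05_VEC',  # teal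
--     'COLORSET_08_VEC',  # violet
--     'COLORSET_11_VEC',  # light green
--     'COLORSET_09_VEC',  # dark blue
-- )
--
-- def _color_for_branch(name, all_names):
--     # One explicit pass instead of sort + index: the sorted-list index of the
--     # first occurrence of `name` equals the number of non-main names strictly
--     # below it; track that count and a found flag in a single loop.
--     if name == 'main' or name == 'master':
--         return _PALETTE[0]
--     less = 0
--     found = False
--     for n in all_names:
--         if n == 'main' or n == 'master':
--             continue
--         if n < name:
--             less += 1
--         elif n == name:
--             found = True
--     return _PALETTE[(less + 1) % 10 if found else 1]
-- ===== Notes on version B (the rewrite author's own statement) =====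
-- stated objective: faster
-- what changed: Replaces sorting the non-main names and calling list.index inside try/except with a single explicit loop that accumulates the count of lesser non-main names and a found flag, then indexes a fixed palette directly.
import Mathlib
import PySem

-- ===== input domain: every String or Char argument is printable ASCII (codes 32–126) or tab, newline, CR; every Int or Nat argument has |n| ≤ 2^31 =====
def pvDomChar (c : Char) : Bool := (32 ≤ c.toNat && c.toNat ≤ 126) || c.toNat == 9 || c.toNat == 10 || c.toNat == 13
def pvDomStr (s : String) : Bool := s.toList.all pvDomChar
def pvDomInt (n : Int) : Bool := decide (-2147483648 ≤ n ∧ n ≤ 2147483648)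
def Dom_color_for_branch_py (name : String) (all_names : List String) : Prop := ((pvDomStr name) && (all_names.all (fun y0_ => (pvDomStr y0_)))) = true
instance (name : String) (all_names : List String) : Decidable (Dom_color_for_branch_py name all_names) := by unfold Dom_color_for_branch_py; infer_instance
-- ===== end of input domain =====

-- B replaces sort + list.index by one explicit loop accumulating a lesser-count and a found flag (objective: faster).


-- ===== PORT A =====
def branchColors : List String :=
  ["COLORSET_04_VEC", "COLORSET_01_VEC", "COLORSET_06_VEC", "COLORSET_03_VEC",
   "COLORSET_07_VEC", "COLORSET_02_VEC", "COLORSET_05_VEC", "COLORSET_08_VEC",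
   "COLORSET_11_VEC", "COLORSET_09_VEC"]

def color_for_branch_py (name : String) (all_names : List String) : String :=
  if name = "main" ∨ name = "master" then branchColors.getD 0 ""
  else
    let others := PySem.List.sorted
      (all_names.filter (fun n => !(n == "main" || n == "master"))) (fun x => x) false
    let idx : Nat :=
      match PySem.List.index? others name with
      | some i => (i + 1) % branchColors.length
      | none => 1
    branchColors.getD idx ""

-- ===== PORT B =====
-- the fixed _PALETTE tuple, read by position
def paletteAt : Nat → String
  | 0 => "COLORSET_04_VEC"
  | 1 => "COLORSET_01_VEC"
  | 2 => "COLORSET_06_VEC"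
  | 3 => "COLORSET_03_VEC"
  | 4 => "COLORSET_07_VEC"
  | 5 => "COLORSET_02_VEC"
  | 6 => "COLORSET_05_VEC"
  | 7 => "COLORSET_08_VEC"
  | 8 => "COLORSET_11_VEC"
  | 9 => "COLORSET_09_VEC"
  | _ => ""

-- Source B's loop: accumulate (less, found) over the list
def scanBranch (name : String) : List String → Nat × Bool
  | [] => (0, false)
  | n :: rest =>
    let acc := scanBranch name rest
    if n = "main" ∨ n = "master" then acc
    else if n < name then (acc.1 + 1, acc.2)
    else if n = name then (acc.1, true)
    else acc

def color_for_branch_py_alt (name : String) (all_names : List String) : String :=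
  if name = "main" ∨ name = "master" then paletteAt 0
  else
    let acc := scanBranch name all_names
    paletteAt (if acc.2 then (acc.1 + 1) % 10 else 1)

-- ===== PRECONDITION & SPEC =====
def Spec_color_for_branch_py (name : String) (all_names : List String) (out : String) : Prop := out = color_for_branch_py_alt name all_names
instance (name : String) (all_names : List String) (out : String) : Decidable (Spec_color_for_branch_py name all_names out) := by unfold Spec_color_for_branch_py; infer_instance

-- ===== CLAIM (what is proved, stated in full; the proofs are below) =====
def Claim_equal_color_for_branch_py : Prop := ∀ (name : String) (all_names : List String), Dom_color_for_branch_py name all_names → Spec_color_for_branch_py name all_names (color_for_branch_py name all_names)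

-- ===== LEMMAS AND PROOFS =====

-- the match-table reads the same entries as A's list lookup
lemma paletteAt_eq_getD (k : Nat) : paletteAt k = branchColors.getD k "" := by
  match k with
  | 0 => rfl
  | 1 => rfl
  | 2 => rfl
  | 3 => rfl
  | 4 => rfl
  | 5 => rfl
  | 6 => rfl
  | 7 => rfl
  | 8 => rfl
  | 9 => rfl
  | (n+10) =>
    have h : branchColors.length ≤ n + 10 := by simp [branchColors]
    simp [paletteAt, List.getD, List.getElem?_eq_none h]

-- B's single pass computes the lesser-count and membership of A's filtered list
lemma scanBranch_spec (name : String) (h1 : name ≠ "main") (h2 : name ≠ "master") :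
    ∀ l : List String, scanBranch name l =
      (l.countP (fun n => decide (n < name) && !(n == "main" || n == "master")),
       l.contains name) := by
  intro l
  induction l with
  | nil => rfl
  | cons n t ih =>
    simp only [scanBranch, ih, List.countP_cons, List.contains_cons]
    by_cases hs : n = "main" ∨ n = "master"
    · have hne : name ≠ n := by rcases hs with h | h <;> simp [h, h1, h2]
      simp [hs, hne]
      rcases hs with h | h <;> simp [h]
    · rw [if_neg hs]
      rcases not_or.mp hs with ⟨hn1, hn2⟩
      by_cases hlt : n < name
      · have hne : name ≠ n := (ne_of_lt hlt).symm
        simp [hlt, hne, hn1, hn2]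
      · rw [if_neg hlt]
        by_cases heq : n = name
        · subst heq
          simp
        · have hne : name ≠ n := fun h => heq h.symm
          have hlt2 : ¬ n.toList < name.toList := by
            intro h; exact hlt (String.lt_iff_toList_lt.mpr h)
          simp [heq, hne, hlt2]

-- index of the first occurrence of a member of a ≤-sorted list = #elements strictly below it
lemma index?_sorted_eq_countP (name : String) :
    ∀ (s : List String), s.Pairwise (· ≤ ·) → name ∈ s →
      PySem.List.index? s name = some (s.countP (fun x => decide (x < name))) := by
  intro s
  induction s with
  | nil => intro _ h; cases h
  | cons a t ih =>
    intro hp hm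
    have hpt := (List.pairwise_cons.mp hp).2
    have hall := (List.pairwise_cons.mp hp).1
    by_cases ha : a = name
    · subst ha
      rw [PySem.List.index?_cons_self, List.countP_cons]
      have h0 : t.countP (fun x => decide (x < a)) = 0 := by
        apply List.countP_eq_zero.mpr
        intro x hx
        simp only [decide_eq_true_eq]
        exact not_lt.mpr (hall x hx)
      simp only [h0, decide_eq_false (lt_irrefl a), Bool.false_eq_true, if_false]
    · have hmt : name ∈ t := by
        cases hm with
        | head => exact absurd rfl ha
        | tail _ h => exact h
      have halt : a < name := lt_of_le_of_ne (hall name hmt) ha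
      rw [PySem.List.index?_cons_of_ne t ha, ih hpt hmt, List.countP_cons]
      simp [halt]

-- ===== VERDICT (by name: the statement is the Claim_ definition above) =====
theorem color_for_branch_py_spec : Claim_equal_color_for_branch_py := by
  intro name all_names _
  unfold Spec_color_for_branch_py color_for_branch_py color_for_branch_py_alt
  by_cases hmm : name = "main" ∨ name = "master"
  · simp [hmm, paletteAt_eq_getD]
  · rcases not_or.mp hmm with ⟨h1, h2⟩
    rw [if_neg hmm, if_neg hmm]
    rw [scanBranch_spec name h1 h2 all_names]
    set f := all_names.filter (fun n => !(n == "main" || n == "master")) with hfdef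
    have hcnt : f.countP (fun x => decide (x < name))
        = all_names.countP (fun n => decide (n < name) && !(n == "main" || n == "master")) := by
      rw [hfdef, List.countP_filter]
    by_cases hm : name ∈ all_names
    · have hmf : name ∈ f := by
        rw [hfdef, List.mem_filter]
        exact ⟨hm, by simp [h1, h2]⟩
      have hms : name ∈ PySem.List.sorted f (fun x => x) false :=
        (PySem.List.mem_sorted f (fun x => x) false name).mpr hmf
      have hps : (PySem.List.sorted f (fun x => x) false).Pairwise (· ≤ ·) :=
        PySem.List.sorted_pairwise f (fun x => x)
      have hperm : (PySem.List.sorted f (fun x => x) false).Perm f :=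
        PySem.List.sorted_perm f (fun x => x) false
      have hidx : PySem.List.index? (PySem.List.sorted f (fun x => x) false) name
          = some (all_names.countP (fun n => decide (n < name) && !(n == "main" || n == "master"))) := by
        rw [index?_sorted_eq_countP name _ hps hms, hperm.countP_eq, hcnt]
      rw [PySem.List.index?_eq_idxOf?] at hidx
      simp [hidx, hm, branchColors, paletteAt_eq_getD]
    · have hnf : name ∉ f := fun h => hm (List.mem_filter.mp h).1
      have hnone : PySem.List.index? (PySem.List.sorted f (fun x => x) false) name = none := by
        rw [PySem.List.index?_eq_none_iff, PySem.List.mem_sorted]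
        exact hnf
      rw [PySem.List.index?_eq_idxOf?] at hnone
      simp [hnone, hm, paletteAt_eq_getD]
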